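-- pv_equiv track=rewrite | github.com/LuizGuzzo/GuidedDecoding | model/GAUnet/binToUnet.py | binary_array_to_graph
-- ===== SOURCE A (Python) =====
-- def binary_array_to_graph(binary_array):
--     n = int(len(binary_array)/2)
--     matrix = []
--     index = 0
--
--     # gerando matriz apartir do array binario
--     for i in range(n-1):
--         row = []
--         for j in range(n-1):
--             if j <= i:
--                 row.append(int(binary_array[index]))
--                 index += 1
--             else:
--                 continue
--         matrix.append(row)
--
--     # conexões
--     # (12)
--     # (13)(23)
--     # (14)(24)(34)
--     # (15)(25)(35)(45)
--
--     # 0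
--     # 0 0
--     # 0 0 0
--     # 1 1 1 1
--
--     # {5: [1,2,3,4]} - o 5 recebe de 1,2,3,4
--
--     # Criando o grafo de conexões
--     graph = {}
--     for i in range(len(matrix)):
--         for j in range(len(matrix[i])):
--             if matrix[i][j] == 1:
--                 if i+2 not in graph:
--                     graph[i+2] = []
--                 graph[i+2].append(j+1)
--
--     return graph
-- ===== SOURCE B (Python) =====
-- def binary_array_to_graph(binary_array):
--     # Simpler: no intermediate triangular matrix; row i of the triangle starts at
--     # the closed-form offset i*(i+1)//2, and each dict entry is built once.
--     n = len(binary_array) // 2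
--     graph = {}
--     for i in range(n - 1):
--         start = i * (i + 1) // 2
--         row = binary_array[start:start + i + 1]
--         targets = [j + 1 for j, v in enumerate(row) if int(v) == 1]
--         if targets:
--             graph[i + 2] = targets
--     return graph
-- ===== Notes on version B (the rewrite author's own statement) =====
-- stated objective: simpler
-- what changed: B drops A's two-phase algorithm (materialise a triangular matrix element-by-element with a running index, then nested-scan that matrix) and instead slices each triangle row directly at its closed-form offset i*(i+1)//2, building each dict entry once with a comprehension.
import Mathlib
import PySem

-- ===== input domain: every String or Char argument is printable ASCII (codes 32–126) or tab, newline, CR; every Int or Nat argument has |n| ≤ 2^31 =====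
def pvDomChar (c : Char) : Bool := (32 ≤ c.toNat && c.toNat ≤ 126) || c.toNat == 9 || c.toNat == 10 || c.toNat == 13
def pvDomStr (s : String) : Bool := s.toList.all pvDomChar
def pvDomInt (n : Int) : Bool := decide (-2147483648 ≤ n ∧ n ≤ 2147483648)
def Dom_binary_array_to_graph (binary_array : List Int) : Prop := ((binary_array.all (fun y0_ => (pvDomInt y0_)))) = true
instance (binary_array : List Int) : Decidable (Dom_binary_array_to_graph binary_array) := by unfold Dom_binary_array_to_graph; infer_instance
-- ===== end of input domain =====

-- B replaces A's two-phase build (triangular matrix materialised index-by-index, then a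
-- nested scan of it) by slicing each row at its closed-form offset i*(i+1)//2 and building
-- each dict entry once; objective: simpler, same O(n^2) cost.


-- ===== PORT A =====
def binary_array_to_graph (binary_array : List Int) : List (Int × List Int) :=
  -- n = int(len(binary_array)/2): true division then int(); for the nonnegative length this is floor division
  let n : Int := PySem.Int.floordiv (binary_array.length : Int) 2
  let mi :=
    (PySem.List.pyRange 0 (n - 1) 1).foldl
      (fun (st : List (List Int) × Int) i =>
        let ri :=
          (PySem.List.pyRange 0 (n - 1) 1).foldl
            (fun (st2 : List Int × Int) j =>
              if j ≤ i then (st2.1 ++ [PySem.List.pyGetD binary_array st2.2 0], st2.2 + 1)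
              else st2)
            ([], st.2)
        (st.1 ++ [ri.1], ri.2))
      ([], 0)
  let matrix := mi.1
  let graph :=
    (PySem.List.pyRange 0 (matrix.length : Int) 1).foldl
      (fun (g : PySem.Dict Int (List Int)) i =>
        let row := PySem.List.pyGetD matrix i []
        (PySem.List.pyRange 0 (row.length : Int) 1).foldl
          (fun g j =>
            if PySem.List.pyGetD row j 0 == 1 then
              let g1 := if g.contains (i + 2) then g else g.insert (i + 2) []
              g1.modify (i + 2) [] (· ++ [j + 1])
            else g)
          g)
      PySem.Dict.empty
  graph.items

-- ===== PORT B =====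
def binary_array_to_graph_alt (binary_array : List Int) : List (Int × List Int) :=
  let n : Int := PySem.Int.floordiv (binary_array.length : Int) 2
  let graph :=
    (PySem.List.pyRange 0 (n - 1) 1).foldl
      (fun (g : PySem.Dict Int (List Int)) i =>
        let start := PySem.Int.floordiv (i * (i + 1)) 2
        let row := PySem.List.slice binary_array (some start) (some (start + i + 1))
        let targets := (PySem.List.enumerate row 0).filterMap
            (fun jv => if jv.2 == 1 then some (jv.1 + 1) else none)
        if targets.isEmpty then g else g.insert (i + 2) targets)
      PySem.Dict.empty
  graph.items

-- ===== PRECONDITION & SPEC =====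
-- Pre_ excludes exactly the inputs on which A raises IndexError: A reads
-- (L//2)*((L//2)-1)/2 triangle entries out of the L-element array, which exist iff L ≤ 11.
def Pre_binary_array_to_graph (binary_array : List Int) : Prop := binary_array.length ≤ 11
instance (binary_array : List Int) : Decidable (Pre_binary_array_to_graph binary_array) := by unfold Pre_binary_array_to_graph; infer_instance
def pvWitness_binary_array_to_graph : List Int := [0, 1, 1, 0, 1, 0]

def Spec_binary_array_to_graph (binary_array : List Int) (out : List (Int × List Int)) : Prop := out = binary_array_to_graph_alt binary_array
instance (binary_array : List Int) (out : List (Int × List Int)) : Decidable (Spec_binary_array_to_graph binary_array out) := by unfold Spec_binary_array_to_graph; infer_instance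

-- ===== CLAIM (what is proved, stated in full; the proofs are below) =====
def Claim_equal_binary_array_to_graph : Prop := ∀ (binary_array : List Int), Dom_binary_array_to_graph binary_array → Pre_binary_array_to_graph binary_array → Spec_binary_array_to_graph binary_array (binary_array_to_graph binary_array)

-- ===== LEMMAS AND PROOFS =====

-- triangular numbers: index where row i of A's matrix starts
def triN : Nat → Nat
  | 0 => 0
  | m + 1 => triN m + (m + 1)

-- row i of A's matrix, read starting at position s
def rowAt (arr : List Int) (s i : Nat) : List Int :=
  (List.range (i + 1)).map (fun j => arr.getD (s + j) 0)

-- the targets list a row contributes to the graph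
def tgt (row : List Int) : List Int :=
  (PySem.List.enumerate row 0).filterMap (fun jv => if jv.2 == 1 then some (jv.1 + 1) else none)

theorem triN_mono {a b : Nat} (h : a ≤ b) : triN a ≤ triN b := by
  induction b with
  | zero => simp [Nat.le_zero.mp h]
  | succ b ih =>
    rcases Nat.lt_or_ge a (b + 1) with h' | h'
    · exact le_trans (ih (by omega)) (by simp [triN])
    · have : a = b + 1 := by omega
      simp [this]

theorem triN_eq (k : Nat) : 2 * triN k = k * (k + 1) := by
  induction k with
  | zero => simp [triN]
  | succ k ih => simp [triN]; nlinarith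

theorem pyRange_pred_nat (nn : Nat) :
    PySem.List.pyRange 0 ((nn : Int) - 1) 1 = (List.range (nn - 1)).map (fun k : Nat => (k : Int)) := by
  rcases Nat.eq_zero_or_pos nn with h | h
  · simp [h, PySem.List.pyRange_one_eq_nil]
  · have h2 : (nn : Int) - 1 = ((nn - 1 : Nat) : Int) := by omega
    rw [h2, PySem.List.pyRange_zero_nat]

theorem innerA_full (arr : List Int) (i : Nat) (t : Nat) (ht : t ≤ i + 1) (r : List Int) (s : Nat) :
    ((List.range t).map (fun x : Nat => (x : Int))).foldl
      (fun (st2 : List Int × Int) j =>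
        if j ≤ (i : Int) then (st2.1 ++ [PySem.List.pyGetD arr st2.2 0], st2.2 + 1) else st2)
      (r, (s : Int))
    = (r ++ (List.range t).map (fun j => arr.getD (s + j) 0), ((s + t : Nat) : Int)) := by
  induction t with
  | zero => simp
  | succ t ih =>
    have ht' : t ≤ i + 1 := by omega
    rw [List.range_succ, List.map_append, List.foldl_append, ih ht']
    have hcond : ((t : Int) ≤ (i : Int)) := by exact_mod_cast Nat.lt_succ_iff.mp ht
    simp only [List.map_cons, List.map_nil, List.foldl_cons, List.foldl_nil, if_pos hcond]
    rw [show ((s + t : Nat) : Int) = ((s + t : Nat) : Int) from rfl]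
    refine Prod.ext ?_ (by push_cast; ring)
    show r ++ List.map (fun j => arr.getD (s + j) 0) (List.range t) ++ [PySem.List.pyGetD arr (↑s + ↑t) 0] = _
    rw [show ((s : Int) + (t : Int)) = ((s + t : Nat) : Int) by push_cast; ring,
      PySem.List.pyGetD_natCast]
    simp [List.getD]

theorem innerA_noop (arr : List Int) (i : Nat) (l : List Int) (h : ∀ x ∈ l, ¬ x ≤ (i : Int))
    (st : List Int × Int) :
    l.foldl
      (fun (st2 : List Int × Int) j =>
        if j ≤ (i : Int) then (st2.1 ++ [PySem.List.pyGetD arr st2.2 0], st2.2 + 1) else st2)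
      st = st := by
  induction l with
  | nil => rfl
  | cons x l ih =>
    simp only [List.foldl_cons, if_neg (h x (by simp))]
    exact ih (fun y hy => h y (by simp [hy])) 

theorem innerA (arr : List Int) (i m : Nat) (hi : i < m) (r : List Int) (s : Nat) :
    ((List.range m).map (fun x : Nat => (x : Int))).foldl
      (fun (st2 : List Int × Int) j =>
        if j ≤ (i : Int) then (st2.1 ++ [PySem.List.pyGetD arr st2.2 0], st2.2 + 1) else st2)
      (r, (s : Int))
    = (r ++ rowAt arr s i, ((s + (i + 1) : Nat) : Int)) := by
  have hm : m = (i + 1) + (m - (i + 1)) := by omega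
  rw [hm, List.range_add, List.map_append, List.foldl_append,
    innerA_full arr i (i + 1) le_rfl r s]
  rw [List.map_map]
  apply innerA_noop
  intro x hx
  simp only [List.mem_map, Function.comp] at hx
  obtain ⟨y, _, hy⟩ := hx
  omega

theorem matrixA (arr : List Int) (m k : Nat) (hk : k ≤ m) (acc : List (List Int)) (s : Nat) :
    ((List.range k).map (fun x : Nat => (x : Int))).foldl
      (fun (st : List (List Int) × Int) i =>
        let ri :=
          ((List.range m).map (fun x : Nat => (x : Int))).foldl
            (fun (st2 : List Int × Int) j =>
              if j ≤ i then (st2.1 ++ [PySem.List.pyGetD arr st2.2 0], st2.2 + 1) else st2)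
            ([], st.2)
        (st.1 ++ [ri.1], ri.2))
      (acc, (s : Int))
    = (acc ++ (List.range k).map (fun i => rowAt arr (s + triN i) i), ((s + triN k : Nat) : Int)) := by
  induction k with
  | zero => simp [triN]
  | succ k ih =>
    rw [List.range_succ, List.map_append, List.foldl_append, ih (by omega)]
    simp only [List.map_cons, List.map_nil, List.foldl_cons, List.foldl_nil]
    rw [innerA arr k m hk [] (s + triN k)]
    simp only [List.map_append, List.map_cons, List.map_nil, List.append_assoc, triN]
    refine Prod.ext rfl ?_
    push_cast; ring

theorem dict_insert_insert (g : PySem.Dict Int (List Int)) (k : Int) (v w : List Int) :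
    (g.insert k v).insert k w = g.insert k w := by
  apply PySem.Dict.ext
  by_cases hc : g.contains k = true
  · rw [PySem.Dict.items_insert_of_contains _ _ (PySem.Dict.contains_insert_self g k v),
      PySem.Dict.items_insert_of_contains _ _ hc, PySem.Dict.items_insert_of_contains _ _ hc,
      List.map_map]
    apply List.map_congr_left
    intro p _
    by_cases hp : p.1 = k <;> simp [Function.comp, hp]
  · have hc' : g.contains k = false := by simpa using hc
    have hmem : ∀ p ∈ g.items, ¬ (p.1 = k) := by
      intro p hp hpk
      have : g.contains k = true := by
        simp only [PySem.Dict.contains, List.any_eq_true]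
        exact ⟨p, hp, by simp [hpk]⟩
      simp [this] at hc'
    rw [PySem.Dict.items_insert_of_not_contains _ _ hc']
    have hcc : (PySem.Dict.mk (g.items ++ [(k, v)]) : PySem.Dict Int (List Int)).contains k = true := by
      simp only [PySem.Dict.contains, List.any_eq_true]
      exact ⟨(k, v), by simp, by simp⟩
    have hstep : (g.insert k v) = PySem.Dict.mk (g.items ++ [(k, v)]) := by
      apply PySem.Dict.ext
      rw [PySem.Dict.items_insert_of_not_contains _ _ hc']
    rw [hstep, PySem.Dict.items_insert_of_contains _ _ hcc]
    simp only [List.map_append]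
    congr 1
    · apply (List.map_congr_left (fun p hp => ?_)).trans (List.map_id _)
      simp [hmem p hp]
    · simp

theorem dict_insert_modify (g : PySem.Dict Int (List Int)) (k : Int) (v d0 : List Int)
    (f : List Int → List Int) : (g.insert k v).modify k d0 f = g.insert k (f v) := by
  show (g.insert k v).insert k (f ((g.insert k v).getD k d0)) = g.insert k (f v)
  rw [PySem.Dict.getD_insert_self, dict_insert_insert]

theorem enumerate_append (xs ys : List Int) (s : Int) :
    PySem.List.enumerate (xs ++ ys) s
      = PySem.List.enumerate xs s ++ PySem.List.enumerate ys (s + xs.length) := by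
  induction xs generalizing s with
  | nil => simp [PySem.List.enumerate_nil]
  | cons x xs ih =>
    simp only [List.cons_append, PySem.List.enumerate_cons, ih (s + 1), List.length_cons]
    refine congrArg _ (congrArg _ (congrArg _ ?_))
    push_cast; ring

theorem tgt_take_succ (row : List Int) (t : Nat) (ht : t < row.length) :
    tgt (row.take (t + 1))
      = tgt (row.take t) ++ (if row.getD t 0 == 1 then [(t : Int) + 1] else []) := by
  unfold tgt
  rw [List.take_add_one, List.getElem?_eq_getElem ht]
  rw [enumerate_append, List.filterMap_append]
  have hlen : (row.take t).length = t := by simp; omega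
  rw [hlen, List.getD_eq_getElem row 0 ht]
  by_cases h : row[t] = (1 : Int) <;>
    simp [PySem.List.enumerate_cons, PySem.List.enumerate_nil, h]

theorem innerG (row : List Int) (key : Int) (g : PySem.Dict Int (List Int))
    (hg : g.contains key = false) (t : Nat) (ht : t ≤ row.length) :
    (List.range t).foldl
      (fun g (j : Nat) =>
        if row.getD j 0 == 1 then
          (if g.contains key then g else g.insert key []).modify key [] (· ++ [(j : Int) + 1])
        else g) g
    = if (tgt (row.take t)).isEmpty then g else g.insert key (tgt (row.take t)) := by
  induction t with
  | zero => simp [tgt, PySem.List.enumerate_nil]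
  | succ t ih =>
    rw [List.range_succ, List.foldl_append, ih (by omega)]
    have ht' : t < row.length := by omega
    simp only [List.foldl_cons, List.foldl_nil]
    rw [tgt_take_succ row t ht', List.getD_eq_getElem row 0 ht']
    by_cases hv : row[t] = (1 : Int)
    · by_cases he : tgt (row.take t) = []
      · simp [hv, he, hg, dict_insert_modify]
      · simp [hv, he, PySem.Dict.contains_insert_self, dict_insert_modify]
    · simp [hv]

theorem rowAt_eq_slice (arr : List Int) (s i : Nat) (h : s + (i + 1) ≤ arr.length) :
    (arr.drop s).take (i + 1) = rowAt arr s i := by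
  apply List.ext_getElem
  · simp [rowAt]; omega
  · intro k h1 h2
    have hk : k < i + 1 := by simp at h1; omega
    have hsk : s + k < arr.length := by omega
    rw [List.getElem_take, List.getElem_drop]
    simp only [rowAt, List.getElem_map, List.getElem_range]
    rw [List.getD_eq_getElem arr 0 hsk]

theorem foldG (R : Nat → List Int) (k : Nat) (g : PySem.Dict Int (List Int))
    (hg : ∀ j : Nat, g.contains ((j : Int) + 2) = false) :
    ((List.range k).foldl
        (fun g (i : Nat) =>
          (List.range (R i).length).foldl
            (fun g (j : Nat) =>
              if (R i).getD j 0 == 1 then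
                (if g.contains ((i : Int) + 2) then g else g.insert ((i : Int) + 2) []).modify
                  ((i : Int) + 2) [] (· ++ [(j : Int) + 1])
              else g) g) g
      = (List.range k).foldl
          (fun g (i : Nat) =>
            if (tgt (R i)).isEmpty then g else g.insert ((i : Int) + 2) (tgt (R i))) g)
    ∧ ∀ j : Nat, k ≤ j →
        ((List.range k).foldl
          (fun g (i : Nat) =>
            if (tgt (R i)).isEmpty then g else g.insert ((i : Int) + 2) (tgt (R i))) g).contains
          ((j : Int) + 2) = false := by
  induction k with
  | zero => exact ⟨rfl, fun j _ => hg j⟩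
  | succ k ih =>
    obtain ⟨heq, hfr⟩ := ih
    constructor
    · rw [List.range_succ, List.foldl_append, List.foldl_append, heq]
      simp only [List.foldl_cons, List.foldl_nil]
      rw [innerG (R k) ((k : Int) + 2) _ (hfr k le_rfl) (R k).length le_rfl, List.take_length]
    · intro j hj
      rw [List.range_succ, List.foldl_append]
      simp only [List.foldl_cons, List.foldl_nil]
      by_cases he : (tgt (R k)).isEmpty = true
      · rw [if_pos he]; exact hfr j (by omega)
      · rw [if_neg he, PySem.Dict.contains_insert]
        have hne : ((j : Int) + 2 == (k : Int) + 2) = false := by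
          simp only [beq_eq_false_iff_ne, ne_eq]
          omega
        rw [hne, hfr j (by omega)]
        rfl

theorem matrixA0 (arr : List Int) (m : Nat) :
    (List.foldl
      (fun (st : List (List Int) × Int) i =>
        (st.1 ++ [(List.foldl
            (fun (st2 : List Int × Int) j =>
              if j ≤ i then (st2.1 ++ [PySem.List.pyGetD arr st2.2 0], st2.2 + 1) else st2)
            ([], st.2) ((List.range m).map (fun k : Nat => (k : Int)))).1],
          (List.foldl
            (fun (st2 : List Int × Int) j =>
              if j ≤ i then (st2.1 ++ [PySem.List.pyGetD arr st2.2 0], st2.2 + 1) else st2)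
            ([], st.2) ((List.range m).map (fun k : Nat => (k : Int)))).2))
      ([], 0) ((List.range m).map (fun k : Nat => (k : Int))))
    = ((List.range m).map (fun i => rowAt arr (triN i) i), ((triN m : Nat) : Int)) := by
  have h := matrixA arr m m le_rfl [] 0
  simpa using h

theorem foldG2 (RA RB : Nat → List Int) (m : Nat) (hR : ∀ k, k < m → RA k = RB k)
    (g : PySem.Dict Int (List Int)) (hg : ∀ j : Nat, g.contains ((j : Int) + 2) = false) :
    (List.range m).foldl
      (fun g (i : Nat) =>
        (List.range (RA i).length).foldl
          (fun g (j : Nat) =>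
            if (RA i).getD j 0 == 1 then
              (if g.contains ((i : Int) + 2) then g else g.insert ((i : Int) + 2) []).modify
                ((i : Int) + 2) [] (· ++ [(j : Int) + 1])
            else g) g) g
    = (List.range m).foldl
        (fun g (i : Nat) =>
          if (tgt (RB i)).isEmpty then g else g.insert ((i : Int) + 2) (tgt (RB i))) g := by
  rw [PySem.List.foldl_congr_mem _ _
    (fun g (i : Nat) =>
      (List.range (RB i).length).foldl
        (fun g (j : Nat) =>
          if (RB i).getD j 0 == 1 then
            (if g.contains ((i : Int) + 2) then g else g.insert ((i : Int) + 2) []).modify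
              ((i : Int) + 2) [] (· ++ [(j : Int) + 1])
          else g) g) g
    (by intro acc x hx; rw [hR x (by simpa using hx)])]
  exact (foldG RB m g hg).1

theorem triN_cast (k : Nat) :
    PySem.Int.floordiv ((k : Int) * ((k : Int) + 1)) 2 = ((triN k : Nat) : Int) := by
  have h2 : 2 * triN k = k * (k + 1) := triN_eq k
  have : ((k : Int) * ((k : Int) + 1)) = ((k * (k + 1) : Nat) : Int) := by push_cast; ring
  rw [this]
  rw [show ((2 : Int) = ((2 : Nat) : Int)) by norm_num, PySem.Int.floordiv_natCast]
  congr 1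
  omega

theorem slice_tri (arr : List Int) (k : Nat) :
    PySem.List.slice arr (some ((triN k : Nat) : Int)) (some (((triN k : Nat) : Int) + (k : Int) + 1))
      = (arr.drop (triN k)).take (k + 1) := by
  have h : (((triN k : Nat) : Int) + (k : Int) + 1) = ((triN k : Nat) : Int) + ((k + 1 : Nat) : Int) := by
    push_cast; ring
  rw [h, PySem.List.slice_natCast_add]

-- ===== VERDICT (by name: the statement is the Claim_ definition above) =====
theorem binary_array_to_graph_spec : Claim_equal_binary_array_to_graph := by
  intro arr _ hpre
  unfold Pre_binary_array_to_graph at hpre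
  unfold Spec_binary_array_to_graph binary_array_to_graph binary_array_to_graph_alt
  have hn : PySem.Int.floordiv ((arr.length : Nat) : Int) 2 = ((arr.length / 2 : Nat) : Int) := by
    exact_mod_cast PySem.Int.floordiv_natCast arr.length 2
  simp only [hn, pyRange_pred_nat]
  rw [matrixA0 arr (arr.length / 2 - 1)]
  simp only [List.foldl_map, PySem.List.pyGetD_natCast, PySem.List.pyRange_zero_nat,
    triN_cast, slice_tri, List.length_map, List.length_range]
  have hL : ∀ L : Nat, L ≤ 11 → triN (L / 2 - 1) ≤ L := by
    intro L hLe
    interval_cases L <;> decide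
  have hfit : ∀ k, k < arr.length / 2 - 1 → triN k + (k + 1) ≤ arr.length := by
    intro k hk
    have h1 : triN (k + 1) ≤ triN (arr.length / 2 - 1) := triN_mono (by omega)
    have h2 : triN (k + 1) = triN k + (k + 1) := rfl
    have h3 := hL arr.length hpre
    omega
  have hR : ∀ k, k < arr.length / 2 - 1 →
      ((List.range (arr.length / 2 - 1)).map (fun i => rowAt arr (triN i) i)).getD k []
        = (arr.drop (triN k)).take (k + 1) := by
    intro k hk
    rw [List.getD_eq_getElem _ _ (by simpa using hk)]
    simp only [List.getElem_map, List.getElem_range]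
    exact (rowAt_eq_slice arr (triN k) k (hfit k hk)).symm
  exact congrArg PySem.Dict.items
    (foldG2 _ _ (arr.length / 2 - 1) hR PySem.Dict.empty
      (fun j => PySem.Dict.contains_empty _))
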